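-- pv_equiv track=rewrite | github.com/dottormarmitta/QF_ComputationalFinance | ExamEs/oddComeFirst.py | mergeWithOddsFirst
-- ===== SOURCE A (Python) =====
-- def mergeWithOddsFirst(list1, list2):
--     # I create an auxiliary vector
--     merged = [None] * (len(list1)*2)
--     end = (len(list1)*2) - 1
--     beginning = 0
--     for i in range(len(list1)):
--         if (isEven(list1[i])):
--             merged[end] = list1[i]
--             end -= 1
--         else:
--             merged[beginning] = list1[i]
--             beginning += 1
--         if (isEven(list2[i])):
--             merged[end] = list2[i]
--             end -= 1
--         else:
--             merged[beginning] = list2[i]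
--             beginning += 1
--     return merged
--
-- def isEven(n):
--     if (n%2 == 0):
--         return True
--     else:
--         return False
-- ===== SOURCE B (Python) =====
-- def mergeWithOddsFirst(list1, list2):
--     # Stage 1: the interleaved sequence the loop visits.
--     seq = [v for i in range(len(list1)) for v in (list1[i], list2[i])]
--     # Stage 2: odds in encounter order, then evens in reverse encounter order.
--     return [v for v in seq if v % 2 != 0] + [v for v in reversed(seq) if v % 2 == 0]
-- ===== Notes on version B (the rewrite author's own statement) =====
-- stated objective: simpler
-- what changed: Replaces A's single interleaved pass writing into a preallocated array via two head/tail pointers by staged passes: first materialise the interleaved sequence, then two independent filter comprehensions (odds of seq, evens of reversed(seq)) concatenated; no write pointers or in-place state at all.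
import Mathlib
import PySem

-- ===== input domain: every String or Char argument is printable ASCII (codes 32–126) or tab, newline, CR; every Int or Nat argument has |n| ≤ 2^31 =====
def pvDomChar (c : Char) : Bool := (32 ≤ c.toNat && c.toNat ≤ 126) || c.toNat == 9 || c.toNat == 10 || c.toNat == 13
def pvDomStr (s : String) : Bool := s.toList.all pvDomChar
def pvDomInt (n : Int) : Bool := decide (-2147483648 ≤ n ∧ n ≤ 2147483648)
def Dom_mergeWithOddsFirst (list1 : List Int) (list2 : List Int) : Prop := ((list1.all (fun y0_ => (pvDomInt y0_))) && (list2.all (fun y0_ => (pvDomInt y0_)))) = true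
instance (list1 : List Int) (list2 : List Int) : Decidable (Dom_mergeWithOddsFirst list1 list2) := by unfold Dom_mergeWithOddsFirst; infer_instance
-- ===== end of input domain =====

-- B replaces A's one interleaved pass with two write pointers into a preallocated array by
-- staged passes: build the interleaved sequence, then filter out the odds and (from the
-- reversed sequence) the evens, and concatenate — simpler, same cost.

-- ===== PORT A =====
-- Python's isEven
def pvIsEven (n : Int) : Bool := if PySem.Int.mod n 2 == 0 then true else false

-- loop body of A: state is (merged, beginning, end); list reads use getD, exact
-- under Pre_ (for i < list1.length both reads are in range; Python raises outside Pre_).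
def pvStepA (l1 l2 : List Int) (st : List Int × Nat × Nat) (i : Nat) : List Int × Nat × Nat :=
  let (merged, b, e) := st
  let (merged, b, e) :=
    if pvIsEven (l1.getD i 0) then (merged.set e (l1.getD i 0), b, e - 1)
    else (merged.set b (l1.getD i 0), b + 1, e)
  if pvIsEven (l2.getD i 0) then (merged.set e (l2.getD i 0), b, e - 1)
  else (merged.set b (l2.getD i 0), b + 1, e)

def mergeWithOddsFirst (list1 : List Int) (list2 : List Int) : List Int :=
  ((List.range list1.length).foldl (pvStepA list1 list2)
    (List.replicate (list1.length * 2) 0, 0, list1.length * 2 - 1)).1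

-- ===== PORT B =====
-- Stage 1 of B: the interleaved sequence [list1[0], list2[0], list1[1], list2[1], …]
def pvSeq (list1 list2 : List Int) : List Int :=
  (List.range list1.length).flatMap (fun i => [list1.getD i 0, list2.getD i 0])

def mergeWithOddsFirst_alt (list1 : List Int) (list2 : List Int) : List Int :=
  let seq := pvSeq list1 list2
  seq.filter (fun v => PySem.Int.mod v 2 != 0)
    ++ seq.reverse.filter (fun v => PySem.Int.mod v 2 == 0)

-- ===== PRECONDITION & SPEC =====
-- Pre_ excludes exactly the inputs where Python A raises IndexError: list2 shorter than list1.
def Pre_mergeWithOddsFirst (list1 : List Int) (list2 : List Int) : Prop :=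
  list1.length ≤ list2.length
instance (list1 : List Int) (list2 : List Int) : Decidable (Pre_mergeWithOddsFirst list1 list2) := by
  unfold Pre_mergeWithOddsFirst; infer_instance
def pvWitness_mergeWithOddsFirst : List Int × List Int := ([1, 2, 5], [4, 7, 6])

def Spec_mergeWithOddsFirst (list1 : List Int) (list2 : List Int) (out : List Int) : Prop := out = mergeWithOddsFirst_alt list1 list2
instance (list1 : List Int) (list2 : List Int) (out : List Int) : Decidable (Spec_mergeWithOddsFirst list1 list2 out) := by unfold Spec_mergeWithOddsFirst; infer_instance

-- ===== CLAIM (what is proved, stated in full; the proofs are below) =====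
def Claim_equal_mergeWithOddsFirst : Prop := ∀ (list1 : List Int) (list2 : List Int), Dom_mergeWithOddsFirst list1 list2 → Pre_mergeWithOddsFirst list1 list2 → Spec_mergeWithOddsFirst list1 list2 (mergeWithOddsFirst list1 list2)

-- ===== LEMMAS AND PROOFS =====

-- proof-side accumulator fold: (odds so far, evens so far) after pair i
def pvStepAcc (l1 l2 : List Int) (st : List Int × List Int) (i : Nat) : List Int × List Int :=
  [l1.getD i 0, l2.getD i 0].foldl
    (fun st v => if PySem.Int.mod v 2 == 0 then (st.1, st.2 ++ [v]) else (st.1 ++ [v], st.2)) st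

-- setting the last cell of a block of zeros
lemma set_replicate_last (k : Nat) (v : Int) :
    (List.replicate (k + 1) (0 : Int)).set k v = List.replicate k 0 ++ [v] := by
  induction k with
  | zero => rfl
  | succ k ih =>
    rw [List.replicate_succ, List.set_cons_succ, ih, List.replicate_succ]
    rfl

-- an even write: A stores v at the `end` pointer (last cell of the zero gap)
lemma pv_write_even (o ev : List Int) (g : Nat) (v : Int) :
    ((o ++ List.replicate (g + 1) (0 : Int)) ++ ev.reverse).set (o.length + g) v
      = (o ++ List.replicate g 0) ++ (ev ++ [v]).reverse := by
  rw [List.set_append, if_pos (by simp only [List.length_append, List.length_replicate]; omega)]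
  rw [List.set_append, if_neg (by simp)]
  have h : o.length + g - o.length = g := by omega
  rw [h, set_replicate_last]
  simp

-- an odd write: A stores v at the `beginning` pointer (first cell of the zero gap)
lemma pv_write_odd (o ev : List Int) (g : Nat) (v : Int) :
    ((o ++ List.replicate (g + 1) (0 : Int)) ++ ev.reverse).set o.length v
      = ((o ++ [v]) ++ List.replicate g 0) ++ ev.reverse := by
  rw [List.set_append, if_pos (by simp)]
  rw [List.set_append, if_neg (by simp)]
  simp [List.replicate_succ]

-- one pair processed: A's state stays in the shape determined by the accumulator (odds, evens)
lemma pv_pair_step (l1 l2 : List Int) (o ev : List Int) (g : Nat) (i : Nat) :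
    pvStepA l1 l2 ((o ++ List.replicate (g + 2) (0 : Int)) ++ ev.reverse, o.length, o.length + (g + 2) - 1) i
      = (((pvStepAcc l1 l2 (o, ev) i).1 ++ List.replicate g 0) ++ (pvStepAcc l1 l2 (o, ev) i).2.reverse,
          (pvStepAcc l1 l2 (o, ev) i).1.length, (pvStepAcc l1 l2 (o, ev) i).1.length + g - 1) := by
  have e1 : o.length + (g + 2) - 1 = o.length + (g + 1) := by omega
  unfold pvStepA pvStepAcc pvIsEven
  simp only [List.foldl_cons, List.foldl_nil]
  by_cases hx : PySem.Int.mod (l1.getD i 0) 2 == 0 <;>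
    by_cases hy : PySem.Int.mod (l2.getD i 0) 2 == 0 <;>
      simp only [hx, hy, Bool.false_eq_true, if_true, if_false, e1]
  · -- x even, y even
    rw [pv_write_even o ev (g + 1) _]
    have e2 : o.length + (g + 1) - 1 = o.length + g := by omega
    rw [e2, pv_write_even o (ev ++ [l1.getD i 0]) g _]
  · -- x even, y odd
    rw [pv_write_even o ev (g + 1) _]
    rw [pv_write_odd o (ev ++ [l1.getD i 0]) g _]
    simp
  · -- x odd, y even
    rw [pv_write_odd o ev (g + 1) _]
    have e2 : o.length + (g + 1) = (o ++ [l1.getD i 0]).length + g := by simp; omega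
    rw [e2, pv_write_even (o ++ [l1.getD i 0]) ev g _]
    simp
  · -- x odd, y odd
    rw [pv_write_odd o ev (g + 1) _]
    have e2 : o.length + 1 = (o ++ [l1.getD i 0]).length := by simp
    rw [e2, pv_write_odd (o ++ [l1.getD i 0]) ev g _]
    simp
    omega

-- the loop invariant relating A's fold to the accumulator fold
lemma pv_invariant (l1 l2 : List Int) (i : Nat) (hi : i ≤ l1.length) :
    (List.range i).foldl (pvStepA l1 l2) (List.replicate (l1.length * 2) 0, 0, l1.length * 2 - 1)
      = ((((List.range i).foldl (pvStepAcc l1 l2) ([], [])).1 ++ List.replicate (l1.length * 2 - 2 * i) 0)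
            ++ (((List.range i).foldl (pvStepAcc l1 l2) ([], [])).2).reverse,
          (((List.range i).foldl (pvStepAcc l1 l2) ([], [])).1).length,
          (((List.range i).foldl (pvStepAcc l1 l2) ([], [])).1).length + (l1.length * 2 - 2 * i) - 1) := by
  induction i with
  | zero => simp
  | succ i ih =>
    have hi' : i ≤ l1.length := Nat.le_of_succ_le hi
    have hA := ih hi'
    rw [List.range_succ, List.foldl_append, List.foldl_append, List.foldl_cons, List.foldl_nil,
        List.foldl_cons, List.foldl_nil, hA]
    have e1 : l1.length * 2 - 2 * i = (l1.length * 2 - 2 * (i + 1)) + 2 := by omega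
    rw [e1, pv_pair_step]

-- the accumulator fold computes exactly B's two filters of the interleaved prefix
lemma pv_acc_filters (l1 l2 : List Int) (i : Nat) :
    (List.range i).foldl (pvStepAcc l1 l2) ([], [])
      = (((List.range i).flatMap (fun j => [l1.getD j 0, l2.getD j 0])).filter
            (fun v => PySem.Int.mod v 2 != 0),
         ((List.range i).flatMap (fun j => [l1.getD j 0, l2.getD j 0])).filter
            (fun v => PySem.Int.mod v 2 == 0)) := by
  induction i with
  | zero => simp
  | succ i ih =>
    rw [List.range_succ, List.foldl_append, List.foldl_cons, List.foldl_nil, ih,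
        List.flatMap_append, List.filter_append, List.filter_append]
    unfold pvStepAcc
    simp only [List.foldl_cons, List.foldl_nil, List.flatMap_cons, List.flatMap_nil,
      List.append_nil, List.filter_cons, List.filter_nil, bne]
    cases hx : PySem.Int.mod (l1.getD i 0) 2 == 0 <;>
      cases hy : PySem.Int.mod (l2.getD i 0) 2 == 0 <;>
        simp only [hx, hy, Bool.not_true, Bool.not_false, if_true, if_false,
          Bool.false_eq_true, List.append_nil, List.nil_append,
          List.cons_append, List.append_assoc]

-- ===== VERDICT (by name: the statement is the Claim_ definition above) =====
theorem mergeWithOddsFirst_spec : Claim_equal_mergeWithOddsFirst := by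
  intro l1 l2 _ _
  unfold Spec_mergeWithOddsFirst mergeWithOddsFirst mergeWithOddsFirst_alt pvSeq
  rw [pv_invariant l1 l2 l1.length le_rfl, pv_acc_filters]
  have h : l1.length * 2 - 2 * l1.length = 0 := by omega
  simp [h, List.filter_reverse]
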